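-- pv_equiv track=rewrite | github.com/miAndreev/Programming101-2 | w0/31.5-member_of_nth_fib_lists/solution.py | member_of_nth_fib_lists
-- ===== SOURCE A (Python) =====
-- def member_of_nth_fib_lists(listA, listB, needle):
--     position = 2
--     while position < len(needle) + 1:
--         following = listA + listB
--         listA = listB
--         listB = following
--         position += 1
--
--         if listB == needle:
--             return True
--
--     return False
-- ===== SOURCE B (Python) =====
-- def member_of_nth_fib_lists(listA, listB, needle):
--     # The n-th Fibonacci-concatenated list is the n-th Fibonacci WORD over the
--     # symbols {0: listA, 1: listB}, flattened.  B never builds the concatenated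
--     # integer lists: it maintains the symbolic words and, for each candidate
--     # word, matches needle against it by consuming one block per symbol.
--     wa, wb = [0], [1]
--     for _ in range(2, len(needle) + 1):
--         wa, wb = wb, wa + wb
--         rest = needle
--         ok = True
--         for s in wb:
--             block = listA if s == 0 else listB
--             if rest[:len(block)] != block:
--                 ok = False
--                 break
--             rest = rest[len(block):]
--         if ok and not rest:
--             return True
--     return False
-- ===== Notes on version B (the rewrite author's own statement) =====
-- stated objective: alternative
-- what changed: B never concatenates the integer lists: it maintains the symbolic Fibonacci words over two symbols and tests each candidate by pattern-matching needle against the word, consuming one listA/listB block per symbol.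
import Mathlib
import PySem

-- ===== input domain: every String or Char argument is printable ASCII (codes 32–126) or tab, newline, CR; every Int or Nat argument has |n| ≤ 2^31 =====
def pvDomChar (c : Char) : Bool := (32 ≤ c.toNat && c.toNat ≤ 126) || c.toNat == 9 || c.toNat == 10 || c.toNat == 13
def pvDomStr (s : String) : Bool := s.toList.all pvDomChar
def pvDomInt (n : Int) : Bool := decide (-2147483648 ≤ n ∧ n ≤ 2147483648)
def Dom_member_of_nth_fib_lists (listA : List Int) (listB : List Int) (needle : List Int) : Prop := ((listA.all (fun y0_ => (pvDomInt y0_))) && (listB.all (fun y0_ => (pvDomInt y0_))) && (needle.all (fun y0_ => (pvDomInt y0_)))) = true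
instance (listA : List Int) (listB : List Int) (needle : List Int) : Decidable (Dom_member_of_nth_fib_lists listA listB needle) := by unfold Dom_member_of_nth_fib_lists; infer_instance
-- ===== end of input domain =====

-- B replaces A's concatenate-and-compare loop by a different representation: it keeps
-- the symbolic Fibonacci WORDS over two symbols and pattern-matches needle against each
-- candidate word, consuming one listA/listB block per symbol; no concatenated integer
-- lists are ever built (alternative algorithm, same order of cost).

-- ===== PORT A =====
-- A's while loop: state (listA, listB); each iteration forms following = listA ++ listB,
-- shifts the pair, and returns True as soon as the new listB equals needle.
-- The loop runs while position < len(needle)+1 starting at position = 2,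
-- i.e. exactly (len(needle) - 1) iterations (Nat subtraction: 0 when len < 2).
def pvLoopA (needle : List Int) (a b : List Int) : Nat → Bool
  | 0 => false
  | n + 1 =>
    let following := a ++ b
    if following == needle then true else pvLoopA needle b following n

def member_of_nth_fib_lists (listA : List Int) (listB : List Int) (needle : List Int) : Bool :=
  pvLoopA needle listA listB (needle.length - 1)

-- ===== PORT B =====
-- Source B's inner for loop over the symbols of the word: rest[:len(block)] and
-- rest[len(block):] with a nonnegative length are exactly take/drop; 'break' with
-- ok = False returns false, and 'ok and not rest' at the end of the word is isEmpty.
def pvMatchWord (listA listB : List Int) : List Int → List Int → Bool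
  | [], rest => rest.isEmpty
  | s :: w, rest =>
    let block := if s == 0 then listA else listB
    if rest.take block.length == block then
      pvMatchWord listA listB w (rest.drop block.length)
    else false

-- Source B's outer for loop over range(2, len(needle)+1): state (wa, wb) of symbolic words.
def pvLoopB (listA listB needle : List Int) : List Int → List Int → Nat → Bool
  | _, _, 0 => false
  | wa, wb, n + 1 =>
    let wb' := wa ++ wb
    if pvMatchWord listA listB wb' needle then true
    else pvLoopB listA listB needle wb wb' n

def member_of_nth_fib_lists_alt (listA : List Int) (listB : List Int) (needle : List Int) : Bool :=
  pvLoopB listA listB needle [0] [1] (needle.length - 1)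

-- ===== PRECONDITION & SPEC =====
def Spec_member_of_nth_fib_lists (listA : List Int) (listB : List Int) (needle : List Int) (out : Bool) : Prop := out = member_of_nth_fib_lists_alt listA listB needle
instance (listA : List Int) (listB : List Int) (needle : List Int) (out : Bool) : Decidable (Spec_member_of_nth_fib_lists listA listB needle out) := by unfold Spec_member_of_nth_fib_lists; infer_instance

-- ===== CLAIM (what is proved, stated in full; the proofs are below) =====
def Claim_equal_member_of_nth_fib_lists : Prop := ∀ (listA : List Int) (listB : List Int) (needle : List Int), Dom_member_of_nth_fib_lists listA listB needle → Spec_member_of_nth_fib_lists listA listB needle (member_of_nth_fib_lists listA listB needle)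

-- ===== LEMMAS AND PROOFS =====
-- interpretation of a symbolic word as the concatenated list it denotes
def pvFlat (listA listB : List Int) (w : List Int) : List Int :=
  w.flatMap (fun s => if s == 0 then listA else listB)

theorem pvFlat_append (listA listB wa wb : List Int) :
    pvFlat listA listB (wa ++ wb) = pvFlat listA listB wa ++ pvFlat listA listB wb := by
  simp [pvFlat]

theorem pvMatch_step (block t rest : List Int) :
    (if rest.take block.length == block then decide (rest.drop block.length = t) else false)
      = decide (rest = block ++ t) := by
  by_cases h : rest.take block.length = block
  · by_cases h2 : rest.drop block.length = t
    · have he : rest = block ++ t := by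
        conv_lhs => rw [← List.take_append_drop block.length rest]
        rw [h, h2]
      simp [he]
    · have hne : rest ≠ block ++ t := fun he => h2 (by rw [he]; simp)
      simp [h, h2, hne]
  · have hne : rest ≠ block ++ t := fun he => h (by rw [he]; simp)
    simp [h, hne]

theorem pvMatchWord_eq (listA listB : List Int) :
    ∀ (w rest : List Int),
      pvMatchWord listA listB w rest = decide (rest = pvFlat listA listB w) := by
  intro w
  induction w with
  | nil => intro rest; cases rest <;> simp [pvMatchWord, pvFlat]
  | cons s w ih =>
    intro rest
    simp only [pvMatchWord, pvFlat, List.flatMap_cons]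
    rw [ih]
    exact pvMatch_step (if s == 0 then listA else listB) (pvFlat listA listB w) rest

theorem pvLoopB_eq (listA listB needle : List Int) :
    ∀ (n : Nat) (wa wb : List Int),
      pvLoopB listA listB needle wa wb n =
        pvLoopA needle (pvFlat listA listB wa) (pvFlat listA listB wb) n := by
  intro n
  induction n with
  | zero => intro wa wb; simp [pvLoopB, pvLoopA]
  | succ n ih =>
    intro wa wb
    simp only [pvLoopB, pvLoopA]
    rw [pvMatchWord_eq, pvFlat_append, ih, pvFlat_append]
    by_cases h : needle = pvFlat listA listB wa ++ pvFlat listA listB wb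
    · simp [h]
    · simp [h, Ne.symm h]

-- ===== VERDICT (by name: the statement is the Claim_ definition above) =====
theorem member_of_nth_fib_lists_spec : Claim_equal_member_of_nth_fib_lists := by
  intro listA listB needle _
  unfold Spec_member_of_nth_fib_lists member_of_nth_fib_lists member_of_nth_fib_lists_alt
  rw [pvLoopB_eq]
  simp [pvFlat]
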